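-- pv_equiv track=rewrite | github.com/cmalek/wyrdcraeft | tests/ocr_metrics.py | _align_characters
-- ===== SOURCE A (Python) =====
-- def _align_characters(
--     expected: str, observed: str
-- ) -> list[tuple[str | None, str | None]]:
--     expected_chars = list(expected)
--     observed_chars = list(observed)
--     rows = len(expected_chars) + 1
--     cols = len(observed_chars) + 1
--     dp = [[0 for _ in range(cols)] for _ in range(rows)]
--
--     for i in range(rows):
--         dp[i][0] = i
--     for j in range(cols):
--         dp[0][j] = j
--
--     for i in range(1, rows):
--         for j in range(1, cols):
--             cost = 0 if expected_chars[i - 1] == observed_chars[j - 1] else 1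
--             dp[i][j] = min(
--                 dp[i - 1][j] + 1,
--                 dp[i][j - 1] + 1,
--                 dp[i - 1][j - 1] + cost,
--             )
--
--     alignment: list[tuple[str | None, str | None]] = []
--     i = rows - 1
--     j = cols - 1
--     while i > 0 or j > 0:
--         if i > 0 and j > 0:
--             cost = 0 if expected_chars[i - 1] == observed_chars[j - 1] else 1
--             if dp[i][j] == dp[i - 1][j - 1] + cost:
--                 alignment.append((expected_chars[i - 1], observed_chars[j - 1]))
--                 i -= 1
--                 j -= 1
--                 continue
--         if i > 0 and dp[i][j] == dp[i - 1][j] + 1: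
--             alignment.append((expected_chars[i - 1], None))
--             i -= 1
--             continue
--         alignment.append((None, observed_chars[j - 1]))
--         j -= 1
--
--     alignment.reverse()
--     return alignment
-- ===== SOURCE B (Python) =====
-- def _align_characters(
--     expected: str, observed: str
-- ) -> list[tuple[str | None, str | None]]:
--     e = list(expected)
--     o = list(observed)
--     m, n = len(e), len(o)
--     # Each cell holds (cost, chain): the best alignment of the two prefixes as a
--     # shared persistent cons-chain ((pair, parent)), head = last pair.  No dp
--     # table is kept and no traceback is performed: the alignment is built
--     # during the single forward pass, keeping only the previous row.
--     prev = [(0, None)]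
--     chain = None
--     for j in range(1, n + 1):
--         chain = ((None, o[j - 1]), chain)
--         prev.append((j, chain))
--     for i in range(1, m + 1):
--         cur = [(i, ((e[i - 1], None), prev[0][1]))]
--         for j in range(1, n + 1):
--             cost = 0 if e[i - 1] == o[j - 1] else 1
--             d = prev[j - 1][0] + cost
--             u = prev[j][0] + 1
--             l = cur[j - 1][0] + 1
--             if d <= u and d <= l:
--                 cell = (d, ((e[i - 1], o[j - 1]), prev[j - 1][1]))
--             elif u <= l:
--                 cell = (u, ((e[i - 1], None), prev[j][1]))
--             else:
--                 cell = (l, ((None, o[j - 1]), cur[j - 1][1]))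
--             cur.append(cell)
--         prev = cur
--     out = []
--     chain = prev[n][1]
--     while chain is not None:
--         out.append(chain[0])
--         chain = chain[1]
--     out.reverse()
--     return out
-- ===== Notes on version B (the rewrite author's own statement) =====
-- stated objective: alternative
-- what changed: B eliminates the dp table and the traceback phase entirely: a single forward pass keeps only the previous row, and each cell carries (cost, alignment) where the alignment is a shared persistent cons-chain extended in O(1); the final cell already holds the answer, with A's tie-break priority (diag, then up, then left) reproduced by the <= comparisons.
import Mathlib
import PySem

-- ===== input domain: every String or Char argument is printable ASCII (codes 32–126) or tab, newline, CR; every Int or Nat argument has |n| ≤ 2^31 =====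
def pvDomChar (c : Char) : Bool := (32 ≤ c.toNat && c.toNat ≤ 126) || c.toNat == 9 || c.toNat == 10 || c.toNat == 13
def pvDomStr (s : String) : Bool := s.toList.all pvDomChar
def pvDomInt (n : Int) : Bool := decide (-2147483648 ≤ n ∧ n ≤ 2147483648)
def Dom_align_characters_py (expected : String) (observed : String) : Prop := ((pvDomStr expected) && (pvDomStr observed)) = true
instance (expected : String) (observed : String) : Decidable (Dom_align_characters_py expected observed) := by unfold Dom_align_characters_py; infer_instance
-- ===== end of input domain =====

-- B drops A's dp table and traceback entirely: one forward pass keeps only the previous row,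
-- each cell carrying (cost, alignment chain); the final cell already holds the alignment.

-- ===== PORT A =====
-- A fills one fresh row per i from the previous row (dp[i][0] = i is the row head,
-- dp[0][j] = j is the initial row), exactly the values A's nested loops store.
def rowA (e o : List Char) (prev : List Nat) (i0 : Nat) : List Nat :=
  (List.range o.length).foldl
    (fun cur j0 =>
      let cost : Nat := if e.getD i0 ' ' = o.getD j0 ' ' then 0 else 1
      cur ++ [min (min (prev.getD (j0 + 1) 0 + 1) (cur.getD j0 0 + 1)) (prev.getD j0 0 + cost)])
    [i0 + 1]

def tableA (e o : List Char) : List (List Nat) :=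
  (List.range e.length).foldl
    (fun acc i0 => acc ++ [rowA e o (acc.getLastD []) i0])
    [List.range (o.length + 1)]

def getT (t : List (List Nat)) (i j : Nat) : Nat := (t.getD i []).getD j 0

-- A's while-loop traceback, recursing on (i, j); in the i>0, j=0 case A's up-test
-- dp[i][0] = dp[i-1][0] + 1 is kept; its else branch is unreachable on any table A builds
-- (dp[i][0] = i), so the port stops there.
def traceA (e o : List Char) (dp : List (List Nat)) : Nat → Nat → List (Option String × Option String)
  | 0, 0 => []
  | i + 1, j + 1 =>
      let cost : Nat := if e.getD i ' ' = o.getD j ' ' then 0 else 1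
      if getT dp (i + 1) (j + 1) = getT dp i j + cost then
        (some (String.ofList [e.getD i ' ']), some (String.ofList [o.getD j ' '])) :: traceA e o dp i j
      else if getT dp (i + 1) (j + 1) = getT dp i (j + 1) + 1 then
        (some (String.ofList [e.getD i ' ']), none) :: traceA e o dp i (j + 1)
      else
        (none, some (String.ofList [o.getD j ' '])) :: traceA e o dp (i + 1) j
  | i + 1, 0 =>
      if getT dp (i + 1) 0 = getT dp i 0 + 1 then
        (some (String.ofList [e.getD i ' ']), none) :: traceA e o dp i 0
      else [] -- unreachable for tables built by tableA
  | 0, j + 1 =>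
      (none, some (String.ofList [o.getD j ' '])) :: traceA e o dp 0 j

def align_characters_py (expected : String) (observed : String) : List (Option String × Option String) :=
  let e := expected.toList
  let o := observed.toList
  (traceA e o (tableA e o) e.length o.length).reverse

-- ===== PORT B =====
-- a cell of B's rolling row: (edit cost, alignment chain, head = last pair);
-- Python's ((pair, parent)) cons-chain is exactly a Lean list built by prepending
abbrev CellB : Type := Nat × List (Option String × Option String)

-- step of the initial row: prev.append((j, ((None, o[j-1]), chain)))
def step0B (o : List Char) (cur : List CellB) (j0 : Nat) : List CellB :=
  cur ++ [(j0 + 1, (none, some (String.ofList [o.getD j0 ' '])) :: (cur.getD j0 (0, [])).2)]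

def row0B (o : List Char) : List CellB :=
  (List.range o.length).foldl (step0B o) [(0, [])]

-- step of the inner loop: compute d, u, l and append the chosen cell
def stepB (e o : List Char) (prev : List CellB) (i0 : Nat) (cur : List CellB) (j0 : Nat) : List CellB :=
  let cost : Nat := if e.getD i0 ' ' = o.getD j0 ' ' then 0 else 1
  let d := (prev.getD j0 (0, [])).1 + cost
  let u := (prev.getD (j0 + 1) (0, [])).1 + 1
  let l := (cur.getD j0 (0, [])).1 + 1
  if d ≤ u ∧ d ≤ l then
    cur ++ [(d, (some (String.ofList [e.getD i0 ' ']), some (String.ofList [o.getD j0 ' '])) :: (prev.getD j0 (0, [])).2)]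
  else if u ≤ l then
    cur ++ [(u, (some (String.ofList [e.getD i0 ' ']), none) :: (prev.getD (j0 + 1) (0, [])).2)]
  else
    cur ++ [(l, (none, some (String.ofList [o.getD j0 ' '])) :: (cur.getD j0 (0, [])).2)]

-- one row of the forward pass, from the previous row of cells
def rowB (e o : List Char) (prev : List CellB) (i0 : Nat) : List CellB :=
  (List.range o.length).foldl (stepB e o prev i0)
    [(i0 + 1, (some (String.ofList [e.getD i0 ' ']), none) :: (prev.getD 0 (0, [])).2)]

-- 'prev = cur' each iteration: only the last row is carried
def lastRowB (e o : List Char) : List CellB :=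
  (List.range e.length).foldl (fun prev i0 => rowB e o prev i0) (row0B o)

def align_characters_py_alt (expected : String) (observed : String) : List (Option String × Option String) :=
  let e := expected.toList
  let o := observed.toList
  ((lastRowB e o).getD o.length (0, [])).2.reverse

-- ===== PRECONDITION & SPEC =====
def Spec_align_characters_py (expected : String) (observed : String) (out : List (Option String × Option String)) : Prop := out = align_characters_py_alt expected observed
instance (expected : String) (observed : String) (out : List (Option String × Option String)) : Decidable (Spec_align_characters_py expected observed out) := by unfold Spec_align_characters_py; infer_instance

-- ===== CLAIM (what is proved, stated in full; the proofs are below) =====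
def Claim_equal_align_characters_py : Prop := ∀ (expected : String) (observed : String), Dom_align_characters_py expected observed → Spec_align_characters_py expected observed (align_characters_py expected observed)

-- ===== LEMMAS AND PROOFS =====

-- the Levenshtein dp value A's table holds
def Dspec (e o : List Char) : Nat → Nat → Nat
  | 0, j => j
  | i + 1, 0 => i + 1
  | i + 1, j + 1 =>
      let cost : Nat := if e.getD i ' ' = o.getD j ' ' then 0 else 1
      min (min (Dspec e o i (j + 1) + 1) (Dspec e o (i + 1) j + 1)) (Dspec e o i j + cost)

-- the (cost, chain) value B's cell (i, j) holds
def fSpec (e o : List Char) : Nat → Nat → Nat × List (Option String × Option String)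
  | 0, 0 => (0, [])
  | 0, j + 1 => (j + 1, (none, some (String.ofList [o.getD j ' '])) :: (fSpec e o 0 j).2)
  | i + 1, 0 => (i + 1, (some (String.ofList [e.getD i ' ']), none) :: (fSpec e o i 0).2)
  | i + 1, j + 1 =>
      let cost : Nat := if e.getD i ' ' = o.getD j ' ' then 0 else 1
      let d := (fSpec e o i j).1 + cost
      let u := (fSpec e o i (j + 1)).1 + 1
      let l := (fSpec e o (i + 1) j).1 + 1
      if d ≤ u ∧ d ≤ l then
        (d, (some (String.ofList [e.getD i ' ']), some (String.ofList [o.getD j ' '])) :: (fSpec e o i j).2)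
      else if u ≤ l then
        (u, (some (String.ofList [e.getD i ' ']), none) :: (fSpec e o i (j + 1)).2)
      else
        (l, (none, some (String.ofList [o.getD j ' '])) :: (fSpec e o (i + 1) j).2)

theorem getD_map_range {α : Type} (f : Nat → α) (a j : Nat) (d : α) (h : j < a) :
    (List.map f (List.range a)).getD j d = f j := by
  simp [List.getD, h]

theorem getLastD_map_range {α : Type} (f : Nat → α) (k : Nat) (d : α) :
    (List.map f (List.range (k + 1))).getLastD d = f k := by
  simp [List.range_succ]

theorem rowA_spec (e o : List Char) (i0 : Nat) (k : Nat) (hk : k ≤ o.length) :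
    (List.range k).foldl
      (fun cur j0 =>
        let cost : Nat := if e.getD i0 ' ' = o.getD j0 ' ' then 0 else 1
        cur ++ [min (min ((List.map (Dspec e o i0) (List.range (o.length + 1))).getD (j0 + 1) 0 + 1)
                         (cur.getD j0 0 + 1))
                    ((List.map (Dspec e o i0) (List.range (o.length + 1))).getD j0 0 + cost)])
      [i0 + 1]
    = List.map (Dspec e o (i0 + 1)) (List.range (k + 1)) := by
  induction k with
  | zero => simp [Dspec]
  | succ k ih =>
      rw [List.range_succ (n := k), List.foldl_append, ih (Nat.le_of_succ_le hk)]
      simp only [List.foldl_cons, List.foldl_nil]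
      rw [getD_map_range _ _ _ _ (by omega), getD_map_range _ _ _ _ (by omega),
          getD_map_range _ _ _ _ (by omega)]
      rw [List.range_succ (n := k + 1), List.map_append]
      simp only [List.map_cons, List.map_nil]
      simp [Dspec]

theorem rowA_eq (e o : List Char) (i0 : Nat) :
    rowA e o (List.map (Dspec e o i0) (List.range (o.length + 1))) i0
      = List.map (Dspec e o (i0 + 1)) (List.range (o.length + 1)) := by
  exact rowA_spec e o i0 o.length le_rfl

theorem tableA_spec (e o : List Char) (k : Nat) (hk : k ≤ e.length) :
    (List.range k).foldl (fun acc i0 => acc ++ [rowA e o (acc.getLastD []) i0])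
      [List.range (o.length + 1)]
    = List.map (fun i => List.map (Dspec e o i) (List.range (o.length + 1))) (List.range (k + 1)) := by
  induction k with
  | zero =>
      simp only [List.range_zero, List.foldl_nil]
      have : List.map (Dspec e o 0) (List.range (o.length + 1)) = List.range (o.length + 1) := by
        have h : ∀ j ∈ List.range (o.length + 1), Dspec e o 0 j = id j := fun j _ => by simp [Dspec]
        rw [List.map_congr_left h, List.map_id]
      simp [this]
  | succ k ih =>
      rw [List.range_succ (n := k), List.foldl_append, ih (Nat.le_of_succ_le hk)]
      simp only [List.foldl_cons, List.foldl_nil]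
      rw [getLastD_map_range, rowA_eq, List.range_succ (n := k + 1), List.map_append]
      rfl

theorem tableA_eq (e o : List Char) :
    tableA e o = List.map (fun i => List.map (Dspec e o i) (List.range (o.length + 1)))
      (List.range (e.length + 1)) := by
  exact tableA_spec e o e.length le_rfl

theorem getT_tableA (e o : List Char) (i j : Nat) (hi : i ≤ e.length) (hj : j ≤ o.length) :
    getT (tableA e o) i j = Dspec e o i j := by
  rw [getT, tableA_eq, getD_map_range _ _ _ _ (by omega), getD_map_range _ _ _ _ (by omega)]

-- equation lemmas for fSpec (well-founded definition, not definitionally reducing)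
theorem fSpec_zz (e o : List Char) : fSpec e o 0 0 = (0, []) := by simp [fSpec]

theorem fSpec_row0 (e o : List Char) (j : Nat) :
    fSpec e o 0 (j + 1) = (j + 1, (none, some (String.ofList [o.getD j ' '])) :: (fSpec e o 0 j).2) := by
  simp [fSpec]

theorem fSpec_col0 (e o : List Char) (i : Nat) :
    fSpec e o (i + 1) 0 = (i + 1, (some (String.ofList [e.getD i ' ']), none) :: (fSpec e o i 0).2) := by
  simp [fSpec]

theorem fSpec_succ (e o : List Char) (i j : Nat) :
    fSpec e o (i + 1) (j + 1) =
      (if ((fSpec e o i j).1 + if e.getD i ' ' = o.getD j ' ' then 0 else 1) ≤ (fSpec e o i (j + 1)).1 + 1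
          ∧ ((fSpec e o i j).1 + if e.getD i ' ' = o.getD j ' ' then 0 else 1) ≤ (fSpec e o (i + 1) j).1 + 1 then
         (((fSpec e o i j).1 + if e.getD i ' ' = o.getD j ' ' then 0 else 1),
          (some (String.ofList [e.getD i ' ']), some (String.ofList [o.getD j ' '])) :: (fSpec e o i j).2)
       else if (fSpec e o i (j + 1)).1 + 1 ≤ (fSpec e o (i + 1) j).1 + 1 then
         ((fSpec e o i (j + 1)).1 + 1, (some (String.ofList [e.getD i ' ']), none) :: (fSpec e o i (j + 1)).2)
       else
         ((fSpec e o (i + 1) j).1 + 1, (none, some (String.ofList [o.getD j ' '])) :: (fSpec e o (i + 1) j).2)) := by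
  simp [fSpec]

-- B's cell cost is the dp value
theorem fSpec_fst (e o : List Char) : ∀ i j, (fSpec e o i j).1 = Dspec e o i j
  | 0, 0 => by simp [fSpec_zz, Dspec]
  | 0, j + 1 => by simp [fSpec_row0, Dspec]
  | i + 1, 0 => by simp [fSpec_col0, Dspec]
  | i + 1, j + 1 => by
      have hd := fSpec_fst e o i j
      have hu := fSpec_fst e o i (j + 1)
      have hl := fSpec_fst e o (i + 1) j
      rw [fSpec_succ]
      simp only [Dspec]
      split_ifs <;> omega

theorem row0B_spec (e o : List Char) (k : Nat) (hk : k ≤ o.length) :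
    (List.range k).foldl (step0B o) [(0, [])] = List.map (fSpec e o 0) (List.range (k + 1)) := by
  induction k with
  | zero =>
      simp only [List.range_zero, List.foldl_nil, List.range_succ, List.nil_append,
        List.map_cons, List.map_nil]
      rw [fSpec_zz]
  | succ k ih =>
      rw [List.range_succ (n := k), List.foldl_append, ih (Nat.le_of_succ_le hk)]
      simp only [List.foldl_cons, List.foldl_nil, step0B]
      rw [getD_map_range _ _ _ _ (by omega)]
      rw [List.range_succ (n := k + 1), List.map_append]
      simp only [List.map_cons, List.map_nil]
      rw [fSpec_row0]

theorem rowB_spec (e o : List Char) (i0 : Nat) (k : Nat) (hk : k ≤ o.length) :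
    (List.range k).foldl (stepB e o (List.map (fSpec e o i0) (List.range (o.length + 1))) i0)
      [(i0 + 1, (some (String.ofList [e.getD i0 ' ']), none) ::
        ((List.map (fSpec e o i0) (List.range (o.length + 1))).getD 0 (0, [])).2)]
    = List.map (fSpec e o (i0 + 1)) (List.range (k + 1)) := by
  induction k with
  | zero =>
      simp only [List.range_zero, List.foldl_nil]
      rw [getD_map_range _ _ _ _ (by omega),
        show List.range (0 + 1) = [0] from rfl]
      simp only [List.map_cons, List.map_nil]
      rw [fSpec_col0]
  | succ k ih =>
      rw [List.range_succ (n := k), List.foldl_append, ih (Nat.le_of_succ_le hk)]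
      simp only [List.foldl_cons, List.foldl_nil, stepB]
      rw [getD_map_range _ _ _ _ (by omega), getD_map_range _ _ _ _ (by omega),
          getD_map_range _ _ _ _ (by omega)]
      rw [List.range_succ (n := k + 1), List.map_append]
      simp only [List.map_cons, List.map_nil]
      rw [fSpec_succ]
      split_ifs <;> rfl

theorem rowB_eq (e o : List Char) (i0 : Nat) :
    rowB e o (List.map (fSpec e o i0) (List.range (o.length + 1))) i0
      = List.map (fSpec e o (i0 + 1)) (List.range (o.length + 1)) := by
  rw [rowB]
  exact rowB_spec e o i0 o.length le_rfl

theorem lastRowB_eq (e o : List Char) :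
    lastRowB e o = List.map (fSpec e o e.length) (List.range (o.length + 1)) := by
  rw [lastRowB]
  have h0 : row0B o = List.map (fSpec e o 0) (List.range (o.length + 1)) := by
    rw [row0B]; exact row0B_spec e o o.length le_rfl
  rw [h0]
  induction e.length with
  | zero => simp
  | succ k ih =>
      rw [List.range_succ (n := k), List.foldl_append, ih]
      simp only [List.foldl_cons, List.foldl_nil]
      exact rowB_eq e o k

-- A's traceback list equals B's chain, cell by cell
theorem trace_eq_chain (e o : List Char) (k : Nat) :
    ∀ i j, i + j ≤ k → i ≤ e.length → j ≤ o.length →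
      traceA e o (tableA e o) i j = (fSpec e o i j).2 := by
  induction k with
  | zero =>
      intro i j h _ _
      obtain ⟨rfl, rfl⟩ : i = 0 ∧ j = 0 := by omega
      simp [traceA, fSpec_zz]
  | succ k ih =>
      intro i j h hi hj
      match i, j with
      | 0, 0 => simp [traceA, fSpec_zz]
      | ii + 1, 0 =>
          rw [traceA, getT_tableA e o (ii + 1) 0 hi hj, getT_tableA e o ii 0 (by omega) hj]
          have hv : Dspec e o (ii + 1) 0 = Dspec e o ii 0 + 1 := by
            cases ii <;> simp [Dspec]
          rw [if_pos hv, ih ii 0 (by omega) (by omega) hj, fSpec_col0]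
      | 0, jj + 1 =>
          rw [traceA, ih 0 jj (by omega) hi (by omega), fSpec_row0]
      | ii + 1, jj + 1 =>
          rw [traceA, getT_tableA e o (ii + 1) (jj + 1) hi hj,
              getT_tableA e o ii jj (by omega) (by omega),
              getT_tableA e o ii (jj + 1) (by omega) hj]
          have hd := fSpec_fst e o ii jj
          have hu := fSpec_fst e o ii (jj + 1)
          have hl := fSpec_fst e o (ii + 1) jj
          have hdp : Dspec e o (ii + 1) (jj + 1)
              = min (min (Dspec e o ii (jj + 1) + 1) (Dspec e o (ii + 1) jj + 1))
                    (Dspec e o ii jj + (if e.getD ii ' ' = o.getD jj ' ' then 0 else 1)) := by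
            simp only [Dspec]
          rw [fSpec_succ]
          set c := (if e.getD ii ' ' = o.getD jj ' ' then (0 : Nat) else 1) with hc
          by_cases h1 : Dspec e o (ii + 1) (jj + 1) = Dspec e o ii jj + c
          · rw [if_pos h1, if_pos (show (fSpec e o ii jj).1 + c ≤ (fSpec e o ii (jj + 1)).1 + 1
                ∧ (fSpec e o ii jj).1 + c ≤ (fSpec e o (ii + 1) jj).1 + 1 by
                  constructor <;> omega)]
            rw [ih ii jj (by omega) (by omega) (by omega)]
          · rw [if_neg h1, if_neg (show ¬ ((fSpec e o ii jj).1 + c ≤ (fSpec e o ii (jj + 1)).1 + 1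
                ∧ (fSpec e o ii jj).1 + c ≤ (fSpec e o (ii + 1) jj).1 + 1) by
                  intro hcontra; omega)]
            by_cases h2 : Dspec e o (ii + 1) (jj + 1) = Dspec e o ii (jj + 1) + 1
            · rw [if_pos h2, if_pos (show (fSpec e o ii (jj + 1)).1 + 1 ≤ (fSpec e o (ii + 1) jj).1 + 1 by omega)]
              rw [ih ii (jj + 1) (by omega) (by omega) hj]
            · rw [if_neg h2, if_neg (show ¬ (fSpec e o ii (jj + 1)).1 + 1 ≤ (fSpec e o (ii + 1) jj).1 + 1 by omega)]
              rw [ih (ii + 1) jj (by omega) hi (by omega)]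

-- ===== VERDICT (by name: the statement is the Claim_ definition above) =====
theorem align_characters_py_spec : Claim_equal_align_characters_py := by
  intro expected observed _
  unfold Spec_align_characters_py align_characters_py align_characters_py_alt
  simp only
  rw [lastRowB_eq, getD_map_range _ _ _ _ (by omega),
      trace_eq_chain expected.toList observed.toList
        (expected.toList.length + observed.toList.length) _ _ le_rfl le_rfl le_rfl]
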